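-- pv_equiv track=rewrite | github.com/13V/Fundii | scraper/grantconnect.py | detect_sizes
-- ===== SOURCE A (Python) =====
-- from typing import List, Dict
--
-- def detect_sizes(text: str) -> List[str]:
--     t = text.lower()
--     sizes = []
--     if any(k in t for k in ["sole trader", "sole proprietor"]): sizes.append("Sole Trader")
--     if any(k in t for k in ["startup", "start-up", "early stage"]): sizes.append("Startup")
--     if any(k in t for k in ["small business", "small to medium", "sme", "small and medium"]): sizes.append("Small")
--     if any(k in t for k in ["medium business", "medium enterprise"]): sizes.append("Medium")
--     if any(k in t for k in ["large business", "large enterprise"]): sizes.append("Large")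
--     if any(k in t for k in ["non-profit", "not-for-profit", "charity", "charities"]): sizes.append("Non-profit")
--     return sizes if sizes else ["All"]
-- ===== SOURCE B (Python) =====
-- from typing import List
--
-- _KEYWORDS = [
--     ("sole trader", 0), ("sole proprietor", 0),
--     ("startup", 1), ("start-up", 1), ("early stage", 1),
--     ("small business", 2), ("small to medium", 2), ("sme", 2), ("small and medium", 2),
--     ("medium business", 3), ("medium enterprise", 3),
--     ("large business", 4), ("large enterprise", 4),
--     ("non-profit", 5), ("not-for-profit", 5), ("charity", 5), ("charities", 5),
-- ]
-- _LABELS = ["Sole Trader", "Startup", "Small", "Medium", "Large", "Non-profit"]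
--
-- def _scan(t: str) -> set:
--     # single left-to-right scan: at each text position, record every keyword
--     # that starts there (by its label index)
--     hit = set()
--     for i in range(len(t)):
--         for kw, idx in _KEYWORDS:
--             if t[i:].startswith(kw):
--                 hit.add(idx)
--     return hit
--
-- def detect_sizes(text: str) -> List[str]:
--     hit = _scan(text.lower())
--     sizes = [lab for j, lab in enumerate(_LABELS) if j in hit]
--     return sizes if sizes else ["All"]
-- ===== Notes on version B (the rewrite author's own statement) =====
-- stated objective: alternative
-- what changed: Instead of A's per-keyword substring tests ('k in t') branch by branch, B makes a single left-to-right scan over the text positions, marking at each position every keyword that starts there in a set of label indices, then reads the matched labels off an ordered table (['All'] fallback kept).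
import Mathlib
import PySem

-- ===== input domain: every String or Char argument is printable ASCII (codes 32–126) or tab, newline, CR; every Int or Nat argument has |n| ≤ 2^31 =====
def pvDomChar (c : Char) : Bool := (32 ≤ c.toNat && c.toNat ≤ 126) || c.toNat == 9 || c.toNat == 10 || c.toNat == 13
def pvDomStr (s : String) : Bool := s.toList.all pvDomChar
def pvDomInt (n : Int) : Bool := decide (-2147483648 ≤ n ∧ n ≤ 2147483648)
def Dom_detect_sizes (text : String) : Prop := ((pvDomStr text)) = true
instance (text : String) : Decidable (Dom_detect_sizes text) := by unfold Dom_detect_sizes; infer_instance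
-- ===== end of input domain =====

-- B replaces A's six per-keyword-group substring tests by a single position-major scan of the
-- text (marking, at each offset, every keyword that starts there in a set of label indices),
-- then reads the matched labels off an ordered table; same return value ('All' fallback kept).

-- ===== PORT A =====
def detect_sizes (text : String) : List String :=
  let t := PySem.Str.lower text
  let sizes : List String := []
  let sizes := if ["sole trader", "sole proprietor"].any (fun k => PySem.Str.isIn k t) then sizes ++ ["Sole Trader"] else sizes
  let sizes := if ["startup", "start-up", "early stage"].any (fun k => PySem.Str.isIn k t) then sizes ++ ["Startup"] else sizes
  let sizes := if ["small business", "small to medium", "sme", "small and medium"].any (fun k => PySem.Str.isIn k t) then sizes ++ ["Small"] else sizes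
  let sizes := if ["medium business", "medium enterprise"].any (fun k => PySem.Str.isIn k t) then sizes ++ ["Medium"] else sizes
  let sizes := if ["large business", "large enterprise"].any (fun k => PySem.Str.isIn k t) then sizes ++ ["Large"] else sizes
  let sizes := if ["non-profit", "not-for-profit", "charity", "charities"].any (fun k => PySem.Str.isIn k t) then sizes ++ ["Non-profit"] else sizes
  if sizes ≠ [] then sizes else ["All"]

-- ===== PORT B =====
def kwTable : List (String × Int) :=
  [("sole trader", 0), ("sole proprietor", 0),
   ("startup", 1), ("start-up", 1), ("early stage", 1),
   ("small business", 2), ("small to medium", 2), ("sme", 2), ("small and medium", 2),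
   ("medium business", 3), ("medium enterprise", 3),
   ("large business", 4), ("large enterprise", 4),
   ("non-profit", 5), ("not-for-profit", 5), ("charity", 5), ("charities", 5)]

def labelTable : List String :=
  ["Sole Trader", "Startup", "Small", "Medium", "Large", "Non-profit"]

-- port of Source B's _scan: single scan over the text positions, marking matched label indices
def scanHit (t : String) : PySem.Set Int :=
  (PySem.List.pyRange 0 (PySem.Str.len t) 1).foldl
    (fun hit i =>
      kwTable.foldl
        (fun hit p =>
          if PySem.Str.startswith (PySem.Str.slice t (some i) none) p.1 then
            PySem.Set.add hit p.2
          else hit)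
        hit)
    PySem.Set.empty

def detect_sizes_alt (text : String) : List String :=
  let hit := scanHit (PySem.Str.lower text)
  let sizes :=
    ((PySem.List.enumerate labelTable).filter
        (fun q => PySem.Set.contains hit q.1)).map Prod.snd
  if sizes = [] then ["All"] else sizes

-- ===== PRECONDITION & SPEC =====
def Spec_detect_sizes (text : String) (out : List String) : Prop := out = detect_sizes_alt text
instance (text : String) (out : List String) : Decidable (Spec_detect_sizes text out) := by unfold Spec_detect_sizes; infer_instance

-- ===== CLAIM (what is proved, stated in full; the proofs are below) =====
def Claim_equal_detect_sizes : Prop := ∀ (text : String), Dom_detect_sizes text → Spec_detect_sizes text (detect_sizes text)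

-- ===== LEMMAS AND PROOFS =====

-- membership after a foldl whose step only ever adds elements described by P
theorem mem_foldl_step {α : Type} (g : PySem.Set Int → α → PySem.Set Int) (P : α → Int → Prop)
    (hg : ∀ s a x, x ∈ g s a ↔ x ∈ s ∨ P a x) :
    ∀ (L : List α) (s : PySem.Set Int) (x : Int),
      x ∈ L.foldl g s ↔ x ∈ s ∨ ∃ a ∈ L, P a x := by
  intro L
  induction L with
  | nil => intro s x; simp
  | cons a L ih =>
    intro s x
    rw [List.foldl_cons, ih, hg]
    simp only [List.mem_cons]
    constructor
    · rintro (⟨h | h⟩ | ⟨b, hb, hP⟩)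
      · exact Or.inl h
      · exact Or.inr ⟨a, Or.inl rfl, h⟩
      · exact Or.inr ⟨b, Or.inr hb, hP⟩
    · rintro (h | ⟨b, (rfl | hb), hP⟩)
      · exact Or.inl (Or.inl h)
      · exact Or.inl (Or.inr hP)
      · exact Or.inr ⟨b, hb, hP⟩

-- the inner loop over the keyword table
theorem mem_inner (t : String) (i : Int) (s : PySem.Set Int) (x : Int) :
    x ∈ kwTable.foldl
        (fun hit p =>
          if PySem.Str.startswith (PySem.Str.slice t (some i) none) p.1 then
            PySem.Set.add hit p.2
          else hit) s
      ↔ x ∈ s ∨ ∃ p ∈ kwTable,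
          PySem.Str.startswith (PySem.Str.slice t (some i) none) p.1 = true ∧ p.2 = x := by
  refine mem_foldl_step _
      (fun p x =>
        PySem.Str.startswith (PySem.Str.slice t (some i) none) p.1 = true ∧ p.2 = x)
      ?_ kwTable s x
  intro s p x
  simp only [PySem.Str.startswith_eq, PySem.Str.toList_slice, PySem.Chars.slice_eq_listSlice]
  by_cases h : PySem.Chars.startswith (PySem.List.slice t.toList (some i)) p.1.toList = true
  · simp [h, PySem.Set.mem_add, eq_comm]
  · simp [h]

-- starting at offset i ≥ 0 is a prefix of the dropped tail
theorem startswith_slice (t : String) (i : Int) (h0 : 0 ≤ i) (kw : String) :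
    PySem.Str.startswith (PySem.Str.slice t (some i) none) kw = true
      ↔ kw.toList <+: t.toList.drop i.toNat := by
  rw [PySem.Str.startswith_eq, PySem.Str.toList_slice, PySem.Chars.slice_eq_listSlice,
      PySem.List.slice_from _ h0, PySem.Chars.startswith_iff]

-- a nonempty keyword occurs as a prefix of some in-range tail iff it is a substring
theorem exists_range_prefix (t kw : List Char) (hkw : kw ≠ []) :
    (∃ i : Int, (0 ≤ i ∧ i < (t.length : Int)) ∧ kw <+: t.drop i.toNat)
      ↔ PySem.Chars.isIn kw t = true := by
  rw [← PySem.Chars.exists_prefix_drop_iff_isIn]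
  constructor
  · rintro ⟨i, _, hp⟩; exact ⟨i.toNat, hp⟩
  · rintro ⟨j, hp⟩
    have hj : j < t.length := by
      by_contra h
      have hnil : t.drop j = [] := List.drop_eq_nil_of_le (le_of_not_gt h)
      rw [hnil] at hp
      exact hkw (List.prefix_nil.mp hp)
    refine ⟨(j : Int), ⟨Int.natCast_nonneg j, by exact_mod_cast hj⟩, ?_⟩
    simpa using hp

-- characterization of the scan: a label index is hit iff one of its keywords is a substring
theorem mem_scanHit (t : String) (x : Int) :
    x ∈ scanHit t ↔ ∃ p ∈ kwTable, p.2 = x ∧ PySem.Str.isIn p.1 t = true := by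
  unfold scanHit
  rw [mem_foldl_step _
      (fun i x => ∃ p ∈ kwTable,
          PySem.Str.startswith (PySem.Str.slice t (some i) none) p.1 = true ∧ p.2 = x)
      (fun s i x => mem_inner t i s x) _ _ x]
  have hempty : x ∈ (PySem.Set.empty : PySem.Set Int) ↔ False := by
    simp [PySem.Set.empty]
  rw [hempty, false_or]
  constructor
  · rintro ⟨i, hi, p, hp, hsw, hx⟩
    have hb := PySem.List.mem_pyRange_one.mp hi
    have hne : p.1.toList ≠ [] := by
      have hall : ∀ q ∈ kwTable, q.1.toList ≠ [] := by decide
      exact hall p hp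
    refine ⟨p, hp, hx, ?_⟩
    rw [PySem.Str.isIn_eq]
    refine (exists_range_prefix t.toList p.1.toList hne).mp ⟨i, ⟨hb.1, ?_⟩, ?_⟩
    · have : PySem.Str.len t = (t.toList.length : Int) := by
        simp [PySem.Str.len_eq]
      omega
    · exact (startswith_slice t i hb.1 p.1).mp hsw
  · rintro ⟨p, hp, hx, hin⟩
    have hne : p.1.toList ≠ [] := by
      have hall : ∀ q ∈ kwTable, q.1.toList ≠ [] := by decide
      exact hall p hp
    rw [PySem.Str.isIn_eq] at hin
    obtain ⟨i, ⟨h0, hlt⟩, hpre⟩ := (exists_range_prefix t.toList p.1.toList hne).mpr hin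
    refine ⟨i, PySem.List.mem_pyRange_one.mpr ⟨h0, ?_⟩, p, hp, (startswith_slice t i h0 p.1).mpr hpre, hx⟩
    have : PySem.Str.len t = (t.toList.length : Int) := by
      simp [PySem.Str.len_eq]
    omega

-- ===== VERDICT (by name: the statement is the Claim_ definition above) =====
theorem detect_sizes_spec : Claim_equal_detect_sizes := by
  intro text _
  unfold Spec_detect_sizes detect_sizes detect_sizes_alt
  have hc : ∀ (j : Int) (kws : List String),
      (∀ q : String × Int, q ∈ kwTable → q.2 = j → q.1 ∈ kws) →
      (∀ k ∈ kws, (k, j) ∈ kwTable) →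
      PySem.Set.contains (scanHit (PySem.Str.lower text)) j
        = kws.any (fun k => PySem.Str.isIn k (PySem.Str.lower text)) := by
    intro j kws hfwd hbwd
    rw [Bool.eq_iff_iff, PySem.Set.contains_iff, mem_scanHit, List.any_eq_true]
    constructor
    · rintro ⟨p, hp, hj, hin⟩
      exact ⟨p.1, hfwd p hp hj, hin⟩
    · rintro ⟨k, hk, hin⟩
      exact ⟨(k, j), hbwd k hk, rfl, hin⟩
  have henum : PySem.List.enumerate labelTable =
      [((0 : Int), "Sole Trader"), (1, "Startup"), (2, "Small"),
       (3, "Medium"), (4, "Large"), (5, "Non-profit")] := by rfl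
  have h0 := hc 0 ["sole trader", "sole proprietor"] (by decide) (by decide)
  have h1 := hc 1 ["startup", "start-up", "early stage"] (by decide) (by decide)
  have h2 := hc 2 ["small business", "small to medium", "sme", "small and medium"] (by decide) (by decide)
  have h3 := hc 3 ["medium business", "medium enterprise"] (by decide) (by decide)
  have h4 := hc 4 ["large business", "large enterprise"] (by decide) (by decide)
  have h5 := hc 5 ["non-profit", "not-for-profit", "charity", "charities"] (by decide) (by decide)
  simp only [henum, List.filter_cons, List.filter_nil, h0, h1, h2, h3, h4, h5]
  generalize (["sole trader", "sole proprietor"].any fun k => PySem.Str.isIn k (PySem.Str.lower text)) = b1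
  generalize (["startup", "start-up", "early stage"].any fun k => PySem.Str.isIn k (PySem.Str.lower text)) = b2
  generalize (["small business", "small to medium", "sme", "small and medium"].any fun k => PySem.Str.isIn k (PySem.Str.lower text)) = b3
  generalize (["medium business", "medium enterprise"].any fun k => PySem.Str.isIn k (PySem.Str.lower text)) = b4
  generalize (["large business", "large enterprise"].any fun k => PySem.Str.isIn k (PySem.Str.lower text)) = b5
  generalize (["non-profit", "not-for-profit", "charity", "charities"].any fun k => PySem.Str.isIn k (PySem.Str.lower text)) = b6
  cases b1 <;> cases b2 <;> cases b3 <;> cases b4 <;> cases b5 <;> cases b6 <;> rfl
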